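-- pv_equiv track=rewrite | github.com/ctripcorp/x-pipe | redis/redis-keeper/src/test/resources/SiwtchTestScript/switch_keeper.py | parse_info_fields
-- ===== SOURCE A (Python) =====
-- def parse_info_fields(response_str):
--     if not response_str:
--         return None, None, None, None
--     role = None
--     master_repl_offset = None
--     slave_repl_offset = None
--     gtid_set = None
--     gtid_lost = None
--     for line in response_str.splitlines():
--         if line.startswith("role:"):
--             role = line[len("role:"):].strip()
--         elif line.startswith("master_repl_offset:"):
--             try:
--                 master_repl_offset = int(line[len("master_repl_offset:"):].strip())
--             except ValueError:
--                 pass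
--         elif line.startswith("slave_repl_offset:"):
--             try:
--                 slave_repl_offset = int(line[len("slave_repl_offset:"):].strip())
--             except ValueError:
--                 pass
--         elif line.startswith("gtid_set:"):
--             gtid_set = line[len("gtid_set:"):].strip()
--         elif line.startswith("gtid_lost:"):
--             gtid_lost = line[len("gtid_lost:"):].strip()
--     repl_offset = master_repl_offset if role == "master" else slave_repl_offset
--     return role, repl_offset, gtid_set, gtid_lost
-- ===== SOURCE B (Python) =====
-- def parse_info_fields(response_str):
--     # Reverse scan: last occurrence wins in A, so search the reversed lines for the
--     # FIRST match of each key (early exit); only the relevant offset key is searched.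
--     rev = list(reversed(response_str.splitlines()))
--
--     def find_text(prefix):
--         for line in rev:
--             if line.startswith(prefix):
--                 return line[len(prefix):].strip()
--         return None
--
--     def find_int(prefix):
--         for line in rev:
--             if line.startswith(prefix):
--                 try:
--                     return int(line[len(prefix):].strip())
--                 except ValueError:
--                     pass
--         return None
--
--     role = find_text("role:")
--     if role == "master":
--         repl_offset = find_int("master_repl_offset:")
--     else:
--         repl_offset = find_int("slave_repl_offset:")
--     return role, repl_offset, find_text("gtid_set:"), find_text("gtid_lost:")
-- ===== Notes on version B (the rewrite author's own statement) =====
-- stated objective: alternative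
-- what changed: Replaces A's single forward accumulating pass (five named variables, last write wins) by a reverse scan: the lines are reversed once and each wanted field is obtained by an early-exit first-match search over the reversed list, so only the offset key selected by role is ever searched.
import Mathlib
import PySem

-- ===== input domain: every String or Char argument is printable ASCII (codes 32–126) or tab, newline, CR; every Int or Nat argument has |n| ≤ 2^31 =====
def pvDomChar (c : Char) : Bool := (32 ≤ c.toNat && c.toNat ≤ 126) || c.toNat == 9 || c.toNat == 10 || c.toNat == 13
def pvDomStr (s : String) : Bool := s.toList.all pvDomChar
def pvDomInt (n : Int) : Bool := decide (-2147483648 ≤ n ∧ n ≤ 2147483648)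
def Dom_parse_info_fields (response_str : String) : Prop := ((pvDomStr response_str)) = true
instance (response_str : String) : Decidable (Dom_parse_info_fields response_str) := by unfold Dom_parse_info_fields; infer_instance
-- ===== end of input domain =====

-- B replaces A's forward accumulating pass by a reverse scan with early-exit per-key searches; neither mutates its argument.

-- ===== PORT A =====
-- loop state: (role, master_repl_offset, slave_repl_offset, gtid_set, gtid_lost)
def pvAState : Type := Option String × Option Int × Option Int × Option String × Option String

def pvA_step (st : pvAState) (line : String) : pvAState :=
  if PySem.Str.startswith line "role:" then
    (some (PySem.Str.strip (PySem.Str.slice line (some 5) none)), st.2)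
  else if PySem.Str.startswith line "master_repl_offset:" then
    match PySem.Int.ofStr? (PySem.Str.strip (PySem.Str.slice line (some 19) none)) with
    | some n => (st.1, some n, st.2.2)
    | none => st
  else if PySem.Str.startswith line "slave_repl_offset:" then
    match PySem.Int.ofStr? (PySem.Str.strip (PySem.Str.slice line (some 18) none)) with
    | some n => (st.1, st.2.1, some n, st.2.2.2)
    | none => st
  else if PySem.Str.startswith line "gtid_set:" then
    (st.1, st.2.1, st.2.2.1, some (PySem.Str.strip (PySem.Str.slice line (some 9) none)), st.2.2.2.2)
  else if PySem.Str.startswith line "gtid_lost:" then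
    (st.1, st.2.1, st.2.2.1, st.2.2.2.1, some (PySem.Str.strip (PySem.Str.slice line (some 10) none)))
  else st

def parse_info_fields (response_str : String) : Option String × Option Int × Option String × Option String :=
  if response_str = "" then (none, none, none, none)
  else
    let st := (PySem.Str.splitlines response_str).foldl pvA_step
      ((none, none, none, none, none) : pvAState)
    let repl_offset := if st.1 = some "master" then st.2.1 else st.2.2.1
    (st.1, repl_offset, st.2.2.2.1, st.2.2.2.2)

-- ===== PORT B =====
-- find_text(prefix): first line of the (reversed) list starting with prefix, stripped tail
def pvFindText (p : String) (n : Int) : List String → Option String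
  | [] => none
  | l :: ls =>
    if PySem.Str.startswith l p then some (PySem.Str.strip (PySem.Str.slice l (some n) none))
    else pvFindText p n ls

-- find_int(prefix): like find_text but keeps scanning past values int() rejects
def pvFindInt (p : String) (n : Int) : List String → Option Int
  | [] => none
  | l :: ls =>
    if PySem.Str.startswith l p then
      match PySem.Int.ofStr? (PySem.Str.strip (PySem.Str.slice l (some n) none)) with
      | some v => some v
      | none => pvFindInt p n ls
    else pvFindInt p n ls

def parse_info_fields_alt (response_str : String) : Option String × Option Int × Option String × Option String :=
  let rev := (PySem.Str.splitlines response_str).reverse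
  let role := pvFindText "role:" 5 rev
  let repl_offset := if role = some "master" then pvFindInt "master_repl_offset:" 19 rev
                     else pvFindInt "slave_repl_offset:" 18 rev
  (role, repl_offset, pvFindText "gtid_set:" 9 rev, pvFindText "gtid_lost:" 10 rev)

-- ===== PRECONDITION & SPEC =====
def Spec_parse_info_fields (response_str : String) (out : Option String × Option Int × Option String × Option String) : Prop := out = parse_info_fields_alt response_str
instance (response_str : String) (out : Option String × Option Int × Option String × Option String) : Decidable (Spec_parse_info_fields response_str out) := by unfold Spec_parse_info_fields; infer_instance

-- ===== CLAIM (what is proved, stated in full; the proofs are below) =====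
def Claim_equal_parse_info_fields : Prop := ∀ (response_str : String), Dom_parse_info_fields response_str → Spec_parse_info_fields response_str (parse_info_fields response_str)

-- ===== LEMMAS AND PROOFS =====

-- two incomparable prefixes cannot both start the same line
theorem pvExcl {l p q : List Char} (h : ¬ (p <+: q) ∧ ¬ (q <+: p))
    (hp : PySem.Chars.startswith l p = true) : PySem.Chars.startswith l q = false := by
  rw [PySem.Chars.startswith_iff] at hp
  rw [← Bool.not_eq_true, PySem.Chars.startswith_iff]
  intro hq
  rcases List.prefix_or_prefix_of_prefix hp hq with h1 | h1
  · exact h.1 h1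
  · exact h.2 h1

theorem pvFindText_append (p : String) (n : Int) (xs ys : List String) :
    pvFindText p n (xs ++ ys) = (pvFindText p n xs).or (pvFindText p n ys) := by
  induction xs with
  | nil => simp [pvFindText]
  | cons x xs ih =>
    simp only [List.cons_append, pvFindText]
    split
    · simp
    · exact ih

theorem pvFindInt_append (p : String) (n : Int) (xs ys : List String) :
    pvFindInt p n (xs ++ ys) = (pvFindInt p n xs).or (pvFindInt p n ys) := by
  induction xs with
  | nil => simp [pvFindInt]
  | cons x xs ih =>
    simp only [List.cons_append, pvFindInt]
    split
    · split
      · simp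
      · exact ih
    · exact ih

-- the five per-line component characterisations of A's step
theorem pvStep_role (st : pvAState) (l : String) :
    (pvA_step st l).1 = (pvFindText "role:" 5 [l]).or st.1 := by
  by_cases h1 : PySem.Str.startswith l "role:" = true
  · simp at h1
    simp [pvA_step, pvFindText, h1]
  ·
    by_cases h2 : PySem.Str.startswith l "master_repl_offset:" = true
    · simp at h1 h2
      have e := pvExcl (q := "role:".toList) (by decide) h2
      simp at e
      cases hm : PySem.Int.ofStr? (PySem.Str.strip (PySem.Str.slice l (some 19) none)) <;>
        simp [pvA_step, pvFindText, hm, e, h2]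
    ·
      by_cases h3 : PySem.Str.startswith l "slave_repl_offset:" = true
      · simp at h1 h2 h3
        have e := pvExcl (q := "role:".toList) (by decide) h3
        simp at e
        cases hm : PySem.Int.ofStr? (PySem.Str.strip (PySem.Str.slice l (some 18) none)) <;>
          simp [pvA_step, pvFindText, hm, e, h2, h3]
      ·
        by_cases h4 : PySem.Str.startswith l "gtid_set:" = true
        · simp at h1 h2 h3 h4
          have e := pvExcl (q := "role:".toList) (by decide) h4
          simp at e
          simp [pvA_step, pvFindText, e, h2, h3, h4]
        ·
          by_cases h5 : PySem.Str.startswith l "gtid_lost:" = true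
          · simp at h1 h2 h3 h4 h5
            have e := pvExcl (q := "role:".toList) (by decide) h5
            simp at e
            simp [pvA_step, pvFindText, e, h2, h3, h4, h5]
          ·
            simp at h1 h2 h3 h4 h5
            simp [pvA_step, pvFindText, h1, h2, h3, h4, h5]

theorem pvStep_master (st : pvAState) (l : String) :
    (pvA_step st l).2.1 = (pvFindInt "master_repl_offset:" 19 [l]).or st.2.1 := by
  by_cases h1 : PySem.Str.startswith l "role:" = true
  · simp at h1
    have e := pvExcl (q := "master_repl_offset:".toList) (by decide) h1
    simp at e
    simp [pvA_step, pvFindInt, e, h1]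
  ·
    by_cases h2 : PySem.Str.startswith l "master_repl_offset:" = true
    · simp at h1 h2
      cases hm : PySem.Int.ofStr? (PySem.Str.strip (PySem.Str.slice l (some 19) none)) <;>
        simp [pvA_step, pvFindInt, hm, h1, h2]
    ·
      by_cases h3 : PySem.Str.startswith l "slave_repl_offset:" = true
      · simp at h1 h2 h3
        have e := pvExcl (q := "master_repl_offset:".toList) (by decide) h3
        simp at e
        cases hm : PySem.Int.ofStr? (PySem.Str.strip (PySem.Str.slice l (some 18) none)) <;>
          simp [pvA_step, pvFindInt, hm, e, h1, h3]
      ·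
        by_cases h4 : PySem.Str.startswith l "gtid_set:" = true
        · simp at h1 h2 h3 h4
          have e := pvExcl (q := "master_repl_offset:".toList) (by decide) h4
          simp at e
          simp [pvA_step, pvFindInt, e, h1, h3, h4]
        ·
          by_cases h5 : PySem.Str.startswith l "gtid_lost:" = true
          · simp at h1 h2 h3 h4 h5
            have e := pvExcl (q := "master_repl_offset:".toList) (by decide) h5
            simp at e
            simp [pvA_step, pvFindInt, e, h1, h3, h4, h5]
          ·
            simp at h1 h2 h3 h4 h5
            simp [pvA_step, pvFindInt, h1, h2, h3, h4, h5]

theorem pvStep_slave (st : pvAState) (l : String) :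
    (pvA_step st l).2.2.1 = (pvFindInt "slave_repl_offset:" 18 [l]).or st.2.2.1 := by
  by_cases h1 : PySem.Str.startswith l "role:" = true
  · simp at h1
    have e := pvExcl (q := "slave_repl_offset:".toList) (by decide) h1
    simp at e
    simp [pvA_step, pvFindInt, e, h1]
  ·
    by_cases h2 : PySem.Str.startswith l "master_repl_offset:" = true
    · simp at h1 h2
      have e := pvExcl (q := "slave_repl_offset:".toList) (by decide) h2
      simp at e
      cases hm : PySem.Int.ofStr? (PySem.Str.strip (PySem.Str.slice l (some 19) none)) <;>
        simp [pvA_step, pvFindInt, hm, e, h1, h2]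
    ·
      by_cases h3 : PySem.Str.startswith l "slave_repl_offset:" = true
      · simp at h1 h2 h3
        cases hm : PySem.Int.ofStr? (PySem.Str.strip (PySem.Str.slice l (some 18) none)) <;>
          simp [pvA_step, pvFindInt, hm, h1, h2, h3]
      ·
        by_cases h4 : PySem.Str.startswith l "gtid_set:" = true
        · simp at h1 h2 h3 h4
          have e := pvExcl (q := "slave_repl_offset:".toList) (by decide) h4
          simp at e
          simp [pvA_step, pvFindInt, e, h1, h2, h4]
        ·
          by_cases h5 : PySem.Str.startswith l "gtid_lost:" = true
          · simp at h1 h2 h3 h4 h5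
            have e := pvExcl (q := "slave_repl_offset:".toList) (by decide) h5
            simp at e
            simp [pvA_step, pvFindInt, e, h1, h2, h4, h5]
          ·
            simp at h1 h2 h3 h4 h5
            simp [pvA_step, pvFindInt, h1, h2, h3, h4, h5]

theorem pvStep_gset (st : pvAState) (l : String) :
    (pvA_step st l).2.2.2.1 = (pvFindText "gtid_set:" 9 [l]).or st.2.2.2.1 := by
  by_cases h1 : PySem.Str.startswith l "role:" = true
  · simp at h1
    have e := pvExcl (q := "gtid_set:".toList) (by decide) h1
    simp at e
    simp [pvA_step, pvFindText, e, h1]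
  ·
    by_cases h2 : PySem.Str.startswith l "master_repl_offset:" = true
    · simp at h1 h2
      have e := pvExcl (q := "gtid_set:".toList) (by decide) h2
      simp at e
      cases hm : PySem.Int.ofStr? (PySem.Str.strip (PySem.Str.slice l (some 19) none)) <;>
        simp [pvA_step, pvFindText, hm, e, h1, h2]
    ·
      by_cases h3 : PySem.Str.startswith l "slave_repl_offset:" = true
      · simp at h1 h2 h3
        have e := pvExcl (q := "gtid_set:".toList) (by decide) h3
        simp at e
        cases hm : PySem.Int.ofStr? (PySem.Str.strip (PySem.Str.slice l (some 18) none)) <;>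
          simp [pvA_step, pvFindText, hm, e, h1, h2, h3]
      ·
        by_cases h4 : PySem.Str.startswith l "gtid_set:" = true
        · simp at h1 h2 h3 h4
          simp [pvA_step, pvFindText, h1, h2, h3, h4]
        ·
          by_cases h5 : PySem.Str.startswith l "gtid_lost:" = true
          · simp at h1 h2 h3 h4 h5
            have e := pvExcl (q := "gtid_set:".toList) (by decide) h5
            simp at e
            simp [pvA_step, pvFindText, e, h1, h2, h3, h5]
          ·
            simp at h1 h2 h3 h4 h5
            simp [pvA_step, pvFindText, h1, h2, h3, h4, h5]

theorem pvStep_glost (st : pvAState) (l : String) :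
    (pvA_step st l).2.2.2.2 = (pvFindText "gtid_lost:" 10 [l]).or st.2.2.2.2 := by
  by_cases h1 : PySem.Str.startswith l "role:" = true
  · simp at h1
    have e := pvExcl (q := "gtid_lost:".toList) (by decide) h1
    simp at e
    simp [pvA_step, pvFindText, e, h1]
  ·
    by_cases h2 : PySem.Str.startswith l "master_repl_offset:" = true
    · simp at h1 h2
      have e := pvExcl (q := "gtid_lost:".toList) (by decide) h2
      simp at e
      cases hm : PySem.Int.ofStr? (PySem.Str.strip (PySem.Str.slice l (some 19) none)) <;>
        simp [pvA_step, pvFindText, hm, e, h1, h2]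
    ·
      by_cases h3 : PySem.Str.startswith l "slave_repl_offset:" = true
      · simp at h1 h2 h3
        have e := pvExcl (q := "gtid_lost:".toList) (by decide) h3
        simp at e
        cases hm : PySem.Int.ofStr? (PySem.Str.strip (PySem.Str.slice l (some 18) none)) <;>
          simp [pvA_step, pvFindText, hm, e, h1, h2, h3]
      ·
        by_cases h4 : PySem.Str.startswith l "gtid_set:" = true
        · simp at h1 h2 h3 h4
          have e := pvExcl (q := "gtid_lost:".toList) (by decide) h4
          simp at e
          simp [pvA_step, pvFindText, e, h1, h2, h3, h4]
        ·
          by_cases h5 : PySem.Str.startswith l "gtid_lost:" = true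
          · simp at h1 h2 h3 h4 h5
            simp [pvA_step, pvFindText, h1, h2, h3, h4, h5]
          ·
            simp at h1 h2 h3 h4 h5
            simp [pvA_step, pvFindText, h1, h2, h3, h4, h5]

theorem pvFold_role (lines : List String) (st : pvAState) :
    (lines.foldl pvA_step st).1 = (pvFindText "role:" 5 lines.reverse).or st.1 := by
  induction lines generalizing st with
  | nil => simp [pvFindText]
  | cons l ls ih =>
    simp only [List.foldl_cons, List.reverse_cons, pvFindText_append]
    rw [ih, pvStep_role, Option.or_assoc]

theorem pvFold_master (lines : List String) (st : pvAState) :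
    (lines.foldl pvA_step st).2.1 = (pvFindInt "master_repl_offset:" 19 lines.reverse).or st.2.1 := by
  induction lines generalizing st with
  | nil => simp [pvFindInt]
  | cons l ls ih =>
    simp only [List.foldl_cons, List.reverse_cons, pvFindInt_append]
    rw [ih, pvStep_master, Option.or_assoc]

theorem pvFold_slave (lines : List String) (st : pvAState) :
    (lines.foldl pvA_step st).2.2.1 = (pvFindInt "slave_repl_offset:" 18 lines.reverse).or st.2.2.1 := by
  induction lines generalizing st with
  | nil => simp [pvFindInt]
  | cons l ls ih =>
    simp only [List.foldl_cons, List.reverse_cons, pvFindInt_append]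
    rw [ih, pvStep_slave, Option.or_assoc]

theorem pvFold_gset (lines : List String) (st : pvAState) :
    (lines.foldl pvA_step st).2.2.2.1 = (pvFindText "gtid_set:" 9 lines.reverse).or st.2.2.2.1 := by
  induction lines generalizing st with
  | nil => simp [pvFindText]
  | cons l ls ih =>
    simp only [List.foldl_cons, List.reverse_cons, pvFindText_append]
    rw [ih, pvStep_gset, Option.or_assoc]

theorem pvFold_glost (lines : List String) (st : pvAState) :
    (lines.foldl pvA_step st).2.2.2.2 = (pvFindText "gtid_lost:" 10 lines.reverse).or st.2.2.2.2 := by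
  induction lines generalizing st with
  | nil => simp [pvFindText]
  | cons l ls ih =>
    simp only [List.foldl_cons, List.reverse_cons, pvFindText_append]
    rw [ih, pvStep_glost, Option.or_assoc]

-- ===== VERDICT (by name: the statement is the Claim_ definition above) =====
theorem parse_info_fields_spec : Claim_equal_parse_info_fields := by
  intro s _
  unfold Spec_parse_info_fields parse_info_fields parse_info_fields_alt
  by_cases hs : s = ""
  · subst hs; decide
  · simp only [if_neg hs]
    have h1 := pvFold_role (PySem.Str.splitlines s) (none, none, none, none, none)
    have h2 := pvFold_master (PySem.Str.splitlines s) (none, none, none, none, none)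
    have h3 := pvFold_slave (PySem.Str.splitlines s) (none, none, none, none, none)
    have h4 := pvFold_gset (PySem.Str.splitlines s) (none, none, none, none, none)
    have h5 := pvFold_glost (PySem.Str.splitlines s) (none, none, none, none, none)
    simp only [Option.or_none] at h1 h2 h3 h4 h5
    simp only [h1, h2, h3, h4, h5]
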